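-- pv_equiv track=rewrite | github.com/netaengel/Hackathon | patients.py | sort_patient_dict_by_urgency
-- ===== SOURCE A (Python) =====
-- def find_urgency_level_in_dict(urgeny_level,patient_dict):
--     total_urgency_level=0
--     for key,value in patient_dict.items():
--         if value[-1] == urgeny_level:
--             total_urgency_level+=1
--     return total_urgency_level
--
-- def sort_patient_dict_by_urgency(patient_dict):
--     sorted_dict={}
--     # current_urgeny_level=1
--     for current_urgeny_level in range(1,11):
--         total_urgeny_level= find_urgency_level_in_dict(current_urgeny_level,patient_dict)
--         for i in range(total_urgeny_level):
--             for key,value in patient_dict.items():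
--                 if value[-1]==current_urgeny_level:
--                     sorted_dict[key]= value
--
--
--     return sorted_dict
-- ===== SOURCE B (Python) =====
-- def sort_patient_dict_by_urgency(patient_dict):
--     # Single pass: bucket each patient by the urgency level (last element of its
--     # value list) into one of 10 buckets, then emit buckets for levels 1..10.
--     buckets = [[] for _ in range(10)]
--     for key, value in patient_dict.items():
--         urgency = value[-1]
--         if 1 <= urgency <= 10:
--             buckets[urgency - 1].append((key, value))
--     result = {}
--     for bucket in buckets:
--         for key, value in bucket:
--             result[key] = value
--     return result
-- ===== Notes on version B (the rewrite author's own statement) =====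
-- stated objective: faster
-- what changed: Replaces A's per-level rescans (10 levels x count-many full passes, each re-inserting every match) with a single bucketing pass over the dict into 10 urgency buckets concatenated in level order.
import Mathlib
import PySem

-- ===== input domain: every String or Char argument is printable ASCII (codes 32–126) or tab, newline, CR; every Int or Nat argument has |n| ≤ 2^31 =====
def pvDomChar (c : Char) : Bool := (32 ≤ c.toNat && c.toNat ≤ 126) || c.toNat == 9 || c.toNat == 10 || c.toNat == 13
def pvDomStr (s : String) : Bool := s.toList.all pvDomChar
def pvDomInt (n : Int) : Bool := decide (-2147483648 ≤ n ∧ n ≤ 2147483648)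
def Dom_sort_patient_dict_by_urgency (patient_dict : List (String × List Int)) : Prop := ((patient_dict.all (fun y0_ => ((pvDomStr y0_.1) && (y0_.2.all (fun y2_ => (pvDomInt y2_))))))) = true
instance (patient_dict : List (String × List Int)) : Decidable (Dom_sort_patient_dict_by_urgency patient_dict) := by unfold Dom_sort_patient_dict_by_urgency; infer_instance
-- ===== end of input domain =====

-- B replaces A's repeated per-level rescans by one bucketing pass (10 urgency buckets, emitted in level order).

-- ===== PORT A =====
def find_urgency_level_in_dict (urgeny_level : Int) (patient_dict : List (String × List Int)) : Int :=
  patient_dict.foldl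
    (fun total_urgency_level kv =>
      if PySem.List.pyGet? kv.2 (-1) = some urgeny_level then total_urgency_level + 1
      else total_urgency_level) 0

def sort_patient_dict_by_urgency (patient_dict : List (String × List Int)) : List (String × List Int) :=
  ((PySem.List.pyRange 1 11 1).foldl
    (fun (sorted_dict : PySem.Dict String (List Int)) current_urgeny_level =>
      let total_urgeny_level := find_urgency_level_in_dict current_urgeny_level patient_dict
      (PySem.List.pyRange 0 total_urgeny_level 1).foldl
        (fun sd _ =>
          patient_dict.foldl
            (fun sd kv =>
              if PySem.List.pyGet? kv.2 (-1) = some current_urgeny_level then sd.insert kv.1 kv.2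
              else sd) sd) sorted_dict)
    PySem.Dict.empty).items

-- ===== PORT B =====
def sort_patient_dict_by_urgency_alt (patient_dict : List (String × List Int)) : List (String × List Int) :=
  let buckets := patient_dict.foldl
    (fun (b : List (List (String × List Int))) kv =>
      match PySem.List.pyGet? kv.2 (-1) with   -- value[-1]; none = IndexError (outside Pre_)
      | some urgency =>
          if 1 ≤ urgency ∧ urgency ≤ 10 then
            b.set (urgency - 1).toNat (b.getD (urgency - 1).toNat [] ++ [kv])
          else b
      | none => b)
    (List.replicate 10 [])
  (buckets.foldl
    (fun (result : PySem.Dict String (List Int)) bucket =>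
      bucket.foldl (fun r kv => r.insert kv.1 kv.2) result)
    PySem.Dict.empty).items

-- ===== PRECONDITION & SPEC =====
-- Pre_: every value list is nonempty (value[-1] raises IndexError in both A and B otherwise), and the keys are
-- pairwise distinct (the argument is a Python dict, whose keys are distinct by construction).
def Pre_sort_patient_dict_by_urgency (patient_dict : List (String × List Int)) : Prop :=
  (patient_dict.map Prod.fst).Nodup ∧ ∀ kv ∈ patient_dict, kv.2 ≠ []
instance (patient_dict : List (String × List Int)) : Decidable (Pre_sort_patient_dict_by_urgency patient_dict) := by
  unfold Pre_sort_patient_dict_by_urgency; infer_instance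

def pvWitness_sort_patient_dict_by_urgency : (List (String × List Int)) :=
  [("alice", [3, 2]), ("bob", [1]), ("carol", [5, 2])]

def Spec_sort_patient_dict_by_urgency (patient_dict : List (String × List Int)) (out : List (String × List Int)) : Prop := out = sort_patient_dict_by_urgency_alt patient_dict
instance (patient_dict : List (String × List Int)) (out : List (String × List Int)) : Decidable (Spec_sort_patient_dict_by_urgency patient_dict out) := by unfold Spec_sort_patient_dict_by_urgency; infer_instance

-- ===== CLAIM (what is proved, stated in full; the proofs are below) =====
def Claim_equal_sort_patient_dict_by_urgency : Prop := ∀ (patient_dict : List (String × List Int)), Dom_sort_patient_dict_by_urgency patient_dict → Pre_sort_patient_dict_by_urgency patient_dict → Spec_sort_patient_dict_by_urgency patient_dict (sort_patient_dict_by_urgency patient_dict)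

-- ===== LEMMAS AND PROOFS =====

-- the patients whose urgency (last element of the value list) is `lvl`, in dict order
def pvMatches (lvl : Int) (pd : List (String × List Int)) : List (String × List Int) :=
  pd.filter (fun kv => decide (PySem.List.pyGet? kv.2 (-1) = some lvl))

-- both programs produce this list: levels 1..10, within a level the dict order
def pvCanon (pd : List (String × List Int)) : List (String × List Int) :=
  (PySem.List.pyRange 1 11 1).flatMap (fun lvl => pvMatches lvl pd)

-- a fold that skips non-matching entries is a fold over pvMatches (the Prop-valued `if` of the ports)
theorem pv_foldl_if_filter {β : Type} (lvl : Int) (f : β → (String × List Int) → β)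
    (init : β) (l : List (String × List Int)) :
    l.foldl (fun a kv => if PySem.List.pyGet? kv.2 (-1) = some lvl then f a kv else a) init
      = (pvMatches lvl l).foldl f init := by
  induction l generalizing init with
  | nil => rfl
  | cons x xs ih =>
      by_cases h : PySem.List.pyGet? x.2 (-1) = some lvl <;> simp [pvMatches, h, ih]

theorem pv_count (lvl : Int) (pd : List (String × List Int)) :
    find_urgency_level_in_dict lvl pd = ((pvMatches lvl pd).length : Int) := by
  unfold find_urgency_level_in_dict
  rw [pv_foldl_if_filter lvl (fun t _ => t + 1) 0 pd]
  suffices h : ∀ (l : List (String × List Int)) (n : Int),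
      l.foldl (fun t _ => t + 1) n = n + l.length by simpa using h (pvMatches lvl pd) 0
  intro l
  induction l with
  | nil => simp
  | cons x xs ih => intro n; simp [ih]; ring

theorem pv_key_inj {pd : List (String × List Int)} (h : (pd.map Prod.fst).Nodup)
    {a b : String × List Int} (ha : a ∈ pd) (hb : b ∈ pd) (hk : a.1 = b.1) : a = b :=
  List.inj_on_of_nodup_map h ha hb hk

theorem pv_match_mem {lvl : Int} {pd : List (String × List Int)} {kv : String × List Int}
    (h : kv ∈ pvMatches lvl pd) : kv ∈ pd ∧ PySem.List.pyGet? kv.2 (-1) = some lvl :=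
  ⟨List.mem_of_mem_filter h, by simpa using List.of_mem_filter h⟩

-- a pair matches at most one level, so with distinct keys the per-level blocks have disjoint keys
theorem pv_nodup_flatMap (pd : List (String × List Int)) (hk : (pd.map Prod.fst).Nodup)
    (L : List Int) (hL : L.Nodup) :
    ((L.flatMap (fun lvl => pvMatches lvl pd)).map Prod.fst).Nodup := by
  induction L with
  | nil => simp
  | cons lvl L ih =>
      obtain ⟨hnotmem, hL'⟩ := List.nodup_cons.mp hL
      simp only [List.flatMap_cons, List.map_append]
      rw [List.nodup_append]
      refine ⟨(List.filter_sublist.map Prod.fst).nodup hk, ih hL', ?_⟩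
      intro a ha b hb hab
      obtain ⟨kv, hkvM, rfl⟩ := List.mem_map.mp ha
      obtain ⟨kv', hkv'F, hk'⟩ := List.mem_map.mp hb
      obtain ⟨l', hl'L, hkv'M⟩ := List.mem_flatMap.mp hkv'F
      have heq : kv = kv' :=
        pv_key_inj hk (pv_match_mem hkvM).1 (pv_match_mem hkv'M).1 (by rw [hk', hab])
      have : lvl = l' := by
        have h1 := (pv_match_mem hkvM).2
        have h2 := (pv_match_mem hkv'M).2
        rw [heq, h2] at h1
        exact (Option.some.inj h1).symm
      exact hnotmem (this ▸ hl'L)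

theorem pv_insert_same (d : PySem.Dict String (List Int)) (k : String) (v : List Int)
    (hnd : d.keys.Nodup) (h : d.get? k = some v) : d.insert k v = d := by
  apply PySem.Dict.ext
  have hc : d.contains k = true := by rw [PySem.Dict.contains_eq_isSome_get?, h]; rfl
  rw [PySem.Dict.items_insert_of_contains d v hc]
  have hcong : ∀ p ∈ d.items, (if (p.1 == k) = true then (k, v) else p) = p := by
    intro p hp
    by_cases hpk : (p.1 == k) = true
    · have hk1 : p.1 = k := by simpa using hpk
      have hg : d.get? p.1 = some p.2 := PySem.Dict.get?_of_mem_items d (by simpa using hp) hnd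
      rw [hk1, h] at hg
      have hv : v = p.2 := Option.some.inj hg
      simp [← hk1, hv]
    · simp [hpk]
  rw [List.map_congr_left hcong]
  simp

theorem pv_fold_insert_idem (l : List (String × List Int)) (d : PySem.Dict String (List Int))
    (hnd : d.keys.Nodup) (h : ∀ kv ∈ l, d.get? kv.1 = some kv.2) :
    l.foldl (fun r kv => r.insert kv.1 kv.2) d = d := by
  induction l with
  | nil => rfl
  | cons x xs ih =>
      simp only [List.foldl_cons]
      rw [pv_insert_same d x.1 x.2 hnd (h x List.mem_cons_self)]
      exact ih (fun kv hkv => h kv (List.mem_cons_of_mem _ hkv))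

theorem pv_repeat_idem {β : Type} (g : β → β) (d : β) (hg : g d = d) (l : List Int) :
    l.foldl (fun x _ => g x) d = d := by
  induction l with
  | nil => rfl
  | cons x xs ih => simpa [hg] using ih

-- one full insertion pass over the dict at a level whose keys are all fresh appends that level's block
theorem pv_pass_fresh (lvl : Int) (pd : List (String × List Int)) (d : PySem.Dict String (List Int))
    (hk : (pd.map Prod.fst).Nodup)
    (hfresh : ∀ a ∈ pvMatches lvl pd, d.contains a.1 = false) :
    (pd.foldl (fun sd kv =>
        if PySem.List.pyGet? kv.2 (-1) = some lvl then sd.insert kv.1 kv.2 else sd) d).items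
      = d.items ++ pvMatches lvl pd := by
  rw [pv_foldl_if_filter lvl (fun r kv => r.insert kv.1 kv.2) d pd]
  have hnodup : ((pvMatches lvl pd).map Prod.fst).Nodup :=
    (List.filter_sublist.map Prod.fst).nodup hk
  have := PySem.Dict.items_foldl_insert_fresh (pvMatches lvl pd) Prod.fst Prod.snd d hfresh hnodup
  simpa using this

-- invariant of A's level loop: the dict's items are the blocks of the levels already processed
theorem pv_A_fold (pd : List (String × List Int)) (hk : (pd.map Prod.fst).Nodup) :
    ∀ (L done : List Int), (done ++ L).Nodup →
    ∀ d : PySem.Dict String (List Int), d.items = done.flatMap (fun lvl => pvMatches lvl pd) →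
    (L.foldl
      (fun (sorted_dict : PySem.Dict String (List Int)) current_urgeny_level =>
        let total_urgeny_level := find_urgency_level_in_dict current_urgeny_level pd
        (PySem.List.pyRange 0 total_urgeny_level 1).foldl
          (fun sd _ =>
            pd.foldl
              (fun sd kv =>
                if PySem.List.pyGet? kv.2 (-1) = some current_urgeny_level then sd.insert kv.1 kv.2
                else sd) sd) sorted_dict) d).items
      = (done ++ L).flatMap (fun lvl => pvMatches lvl pd) := by
  intro L
  induction L with
  | nil => intro done _ d hd; simpa using hd
  | cons lvl L ih =>
      intro done hnd d hd
      simp only [List.foldl_cons]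
      have hkeys : d.keys = (done.flatMap (fun lvl => pvMatches lvl pd)).map Prod.fst := by
        simp only [PySem.Dict.keys, hd]
      have hlvl_notin_done : lvl ∉ done := by
        rcases List.nodup_append.mp hnd with ⟨_, _, hdisj⟩
        intro hmem
        exact hdisj lvl hmem lvl List.mem_cons_self rfl
      have hdone_nodup : (done ++ [lvl]).Nodup := by
        rw [List.nodup_append]
        refine ⟨(List.nodup_append.mp hnd).1, List.nodup_singleton lvl, ?_⟩
        intro a ha b hb hab
        rw [List.mem_singleton.mp hb] at hab
        exact hlvl_notin_done (hab ▸ ha)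
      -- one inner pass writes the whole level block
      have hfresh : ∀ a ∈ pvMatches lvl pd, d.contains a.1 = false := by
        intro a haM
        rw [PySem.Dict.contains_eq_decide_mem_keys, decide_eq_false_iff_not]
        intro hmemk
        rw [hkeys] at hmemk
        obtain ⟨kv', hkv'F, hk'⟩ := List.mem_map.mp hmemk
        obtain ⟨l', hl'done, hkv'M⟩ := List.mem_flatMap.mp hkv'F
        have heq : a = kv' :=
          pv_key_inj hk (pv_match_mem haM).1 (pv_match_mem hkv'M).1 hk'.symm
        have h1 := (pv_match_mem haM).2
        have h2 := (pv_match_mem hkv'M).2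
        rw [heq, h2] at h1
        exact hlvl_notin_done ((Option.some.inj h1).symm ▸ hl'done)
      have hstep :
          ((PySem.List.pyRange 0 (find_urgency_level_in_dict lvl pd) 1).foldl
            (fun sd _ =>
              pd.foldl
                (fun sd kv =>
                  if PySem.List.pyGet? kv.2 (-1) = some lvl then sd.insert kv.1 kv.2
                  else sd) sd) d).items
            = (done ++ [lvl]).flatMap (fun l => pvMatches l pd) := by
        rw [pv_count lvl pd]
        rcases eq_or_ne (pvMatches lvl pd) [] with hM | hM
        · rw [hM]
          simp [hd, hM]
        · have hpos : (0 : Int) < ((pvMatches lvl pd).length : Int) := by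
            have := List.length_pos_of_ne_nil hM
            exact_mod_cast this
          rw [PySem.List.pyRange_one_cons hpos, List.foldl_cons]
          set d' := pd.foldl (fun sd kv =>
              if PySem.List.pyGet? kv.2 (-1) = some lvl then sd.insert kv.1 kv.2 else sd) d with hd'
          have hd'items : d'.items = (done ++ [lvl]).flatMap (fun l => pvMatches l pd) := by
            rw [hd', pv_pass_fresh lvl pd d hk hfresh, hd]
            simp
          have hd'nodup : d'.keys.Nodup := by
            have : d'.keys = ((done ++ [lvl]).flatMap (fun l => pvMatches l pd)).map Prod.fst := by
              simp only [PySem.Dict.keys, hd'items]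
            rw [this]
            exact pv_nodup_flatMap pd hk (done ++ [lvl]) hdone_nodup
          have hidem : pd.foldl (fun sd kv =>
              if PySem.List.pyGet? kv.2 (-1) = some lvl then sd.insert kv.1 kv.2 else sd) d' = d' := by
            rw [pv_foldl_if_filter lvl (fun r kv => r.insert kv.1 kv.2) d' pd]
            refine pv_fold_insert_idem _ _ hd'nodup ?_
            intro kv hkv
            refine PySem.Dict.get?_of_mem_items d' ?_ hd'nodup
            rw [hd'items, List.flatMap_append]
            refine List.mem_append_right _ ?_
            simpa using hkv
          rw [pv_repeat_idem _ d' hidem, hd'items]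
      have hrw : done ++ lvl :: L = (done ++ [lvl]) ++ L := by simp
      rw [hrw]
      exact ih (done ++ [lvl]) (by rw [← hrw]; exact hnd) _ hstep

theorem pv_A_canon (pd : List (String × List Int))
    (hk : (pd.map Prod.fst).Nodup) :
    sort_patient_dict_by_urgency pd = pvCanon pd := by
  unfold sort_patient_dict_by_urgency
  have := pv_A_fold pd hk (PySem.List.pyRange 1 11 1) [] (by decide) PySem.Dict.empty rfl
  simpa [pvCanon] using this

-- B's bucketing pass computes exactly the ten per-level blocks
theorem pv_buckets (pd : List (String × List Int)) :
    (∀ kv ∈ pd, kv.2 ≠ []) →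
    pd.foldl
      (fun (b : List (List (String × List Int))) kv =>
        match PySem.List.pyGet? kv.2 (-1) with
        | some urgency =>
            if 1 ≤ urgency ∧ urgency ≤ 10 then
              b.set (urgency - 1).toNat (b.getD (urgency - 1).toNat [] ++ [kv])
            else b
        | none => b)
      (List.replicate 10 [])
      = (List.range 10).map (fun i : Nat => pvMatches ((i : Int) + 1) pd) := by
  induction pd using List.reverseRecOn with
  | nil => intro _; decide
  | append_singleton xs x ih =>
      intro hv
      have hvx : x.2 ≠ [] := hv x (by simp)
      have hvxs : ∀ kv ∈ xs, kv.2 ≠ [] := fun kv h => hv kv (by simp [h])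
      rw [List.foldl_append, ih hvxs, List.foldl_cons, List.foldl_nil]
      obtain ⟨u, hu⟩ : ∃ u, PySem.List.pyGet? x.2 (-1) = some u := by
        rw [PySem.List.pyGet?_neg_one]
        cases h : x.2.getLast? with
        | none => exact absurd (List.getLast?_eq_none_iff.mp h) hvx
        | some u => exact ⟨u, rfl⟩
      have hfil : ∀ lvl : Int, pvMatches lvl (xs ++ [x])
          = pvMatches lvl xs ++ (if u = lvl then [x] else []) := by
        intro lvl
        simp only [pvMatches, List.filter_append]
        congr 1
        rw [List.filter_cons, List.filter_nil]
        by_cases h : u = lvl <;> simp [hu, h]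
      rw [hu]
      show (if 1 ≤ u ∧ u ≤ 10 then
          ((List.range 10).map (fun i : Nat => pvMatches ((i : Int) + 1) xs)).set (u - 1).toNat
            (((List.range 10).map (fun i : Nat => pvMatches ((i : Int) + 1) xs)).getD
              (u - 1).toNat [] ++ [x])
        else (List.range 10).map (fun i : Nat => pvMatches ((i : Int) + 1) xs))
        = (List.range 10).map (fun i : Nat => pvMatches ((i : Int) + 1) (xs ++ [x]))
      by_cases hrange : 1 ≤ u ∧ u ≤ 10
      · rw [if_pos hrange]
        have hi0 : (u - 1).toNat < 10 := by omega
        have hgetD : ((List.range 10).map (fun i : Nat => pvMatches ((i : Int) + 1) xs)).getD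
            (u - 1).toNat [] = pvMatches (((u - 1).toNat : Int) + 1) xs := by
          rw [List.getD_eq_getElem?_getD, List.getElem?_map, List.getElem?_range hi0]
          rfl
        rw [hgetD]
        apply List.ext_getElem
        · simp
        · intro j h1 h2
          have hj : j < 10 := by simpa using h2
          rw [List.getElem_set]
          simp only [List.getElem_map, List.getElem_range]
          rw [hfil ((j : Int) + 1)]
          by_cases hji : (u - 1).toNat = j
          · rw [if_pos hji]
            have hju : u = (j : Int) + 1 := by omega
            have hcast : (((u - 1).toNat : Int) + 1) = (j : Int) + 1 := by omega
            rw [hcast, if_pos hju]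
          · rw [if_neg hji]
            have hju : ¬ (u = (j : Int) + 1) := by omega
            rw [if_neg hju, List.append_nil]
      · rw [if_neg hrange]
        apply List.map_congr_left
        intro i hi
        have hi10 : i < 10 := List.mem_range.mp hi
        have hiu : ¬ (u = (i : Int) + 1) := by omega
        rw [hfil ((i : Int) + 1), if_neg hiu, List.append_nil]

theorem pv_B_canon (pd : List (String × List Int))
    (hk : (pd.map Prod.fst).Nodup) (hv : ∀ kv ∈ pd, kv.2 ≠ []) :
    sort_patient_dict_by_urgency_alt pd = pvCanon pd := by
  unfold sort_patient_dict_by_urgency_alt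
  rw [pv_buckets pd hv]
  show (((List.range 10).map (fun i : Nat => pvMatches ((i : Int) + 1) pd)).foldl
      (fun (result : PySem.Dict String (List Int)) bucket =>
        bucket.foldl (fun r kv => r.insert kv.1 kv.2) result)
      PySem.Dict.empty).items = pvCanon pd
  rw [← List.foldl_flatten, ← List.flatMap_def]
  have hlev : (List.range 10).map (fun i : Nat => ((i : Int) + 1)) = PySem.List.pyRange 1 11 1 := by
    decide
  have hflat : (List.range 10).flatMap (fun i : Nat => pvMatches ((i : Int) + 1) pd)
      = pvCanon pd := by
    rw [pvCanon, ← hlev, List.flatMap_map]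
  rw [hflat]
  have hfresh : ∀ a ∈ pvCanon pd,
      (PySem.Dict.empty : PySem.Dict String (List Int)).contains a.1 = false :=
    fun a _ => PySem.Dict.contains_empty a.1
  have hnodup : ((pvCanon pd).map Prod.fst).Nodup :=
    pv_nodup_flatMap pd hk (PySem.List.pyRange 1 11 1) (by decide)
  have := PySem.Dict.items_foldl_insert_fresh (pvCanon pd) Prod.fst Prod.snd
    PySem.Dict.empty hfresh hnodup
  simpa [show (PySem.Dict.empty : PySem.Dict String (List Int)).items = [] from rfl] using this

-- ===== VERDICT (by name: the statement is the Claim_ definition above) =====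
theorem sort_patient_dict_by_urgency_spec : Claim_equal_sort_patient_dict_by_urgency := by
  intro pd _ hPre
  unfold Spec_sort_patient_dict_by_urgency
  rw [pv_A_canon pd hPre.1, pv_B_canon pd hPre.1 hPre.2]
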